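-- pv_equiv track=rewrite | github.com/Poptartbr1/testing | lab02.py | property1
-- ===== SOURCE A (Python) =====
-- from math import sqrt
--
-- def get_real(number):
--     return number[0]
--
-- def get_imaginary(number):
--     return number[1]
--
-- def calculate_modulus(number):
--     #Calculate the modulus of a complex number ( sqrt(x^2 + y^2) )
--     return int(sqrt(get_real(number)**2 + get_imaginary(number)**2))
--
-- def property1(numbers):
--     #Function that returns the longest sequence of numbers having increasing modulus
--     #Variable declarations
--     largest = 0
--     temp_largest = 0
--     start_location = 0
--     end_location = 0
--     i = 0
--     #Looping over the list of complex numbers with i starting from the first numner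
--     while i < len(numbers):
--         #j will loop after i
--         j = i+1
--         #Looping with j from the number after i and checking if the modulus of the number j is less than the modulus of number i
--         while (j < len((numbers)) and calculate_modulus(numbers[j-1]) < calculate_modulus(numbers[j])):
--             j += 1
--         #Determine de temporary largest  sequence
--         temp_largest = j-i
--         #If it is largest than our maximum determined sequence, then update the maximum
--         if temp_largest > largest:
--             largest = temp_largest
--             #Determine the start index of our current maximum sequence
--             start_location = i
--             #Determine the end index of our current maximum sequence
--             end_location = j-1
--         #i will take the value of j to skip some unnecessary iterations
--         i=j
--     #We will return the indexes of our longest sequence as a list of [start_location, end_location] if the size of our sequence is at least 2 or greater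
--     return start_location, end_location if end_location - start_location > 0 else  0
-- ===== SOURCE B (Python) =====
-- from math import sqrt
--
-- def property1(numbers):
--     # Staged decomposition: compute moduli once, detect run boundaries, materialise
--     # the list of maximal increasing runs as half-open (start, stop) pairs, then pick
--     # the first longest run with max(key=length).
--     mods = [int(sqrt(x * x + y * y)) for (x, y) in numbers]
--     n = len(mods)
--     cuts = [0] + [k for k in range(1, n) if mods[k - 1] >= mods[k]] + [n]
--     runs = list(zip(cuts, cuts[1:]))
--     s, stop = max(runs, key=lambda r: r[1] - r[0])
--     end = stop - 1
--     return s, end if end - s > 0 else 0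
-- ===== Notes on version B (the rewrite author's own statement) =====
-- stated objective: alternative
-- what changed: Replaces A's nested while-loops with running best-so-far accumulator by a staged pipeline: precompute the moduli, detect run boundaries as a cut-point list, materialise the maximal increasing runs as (start, stop) pairs via zip, and select the first longest run with max(key=length).
import Mathlib
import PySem

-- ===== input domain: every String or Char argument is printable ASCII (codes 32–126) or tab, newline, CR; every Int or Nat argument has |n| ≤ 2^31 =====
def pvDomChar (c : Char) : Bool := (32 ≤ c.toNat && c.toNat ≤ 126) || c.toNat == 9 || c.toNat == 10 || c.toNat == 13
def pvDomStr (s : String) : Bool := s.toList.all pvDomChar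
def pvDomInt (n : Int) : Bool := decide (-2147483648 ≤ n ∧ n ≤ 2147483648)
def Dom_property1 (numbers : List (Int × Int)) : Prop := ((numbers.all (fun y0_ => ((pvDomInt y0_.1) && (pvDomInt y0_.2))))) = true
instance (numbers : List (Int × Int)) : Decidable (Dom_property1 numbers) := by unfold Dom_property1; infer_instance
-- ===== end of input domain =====

-- B replaces A's accumulator scan with nested whiles by a staged pipeline: compute the
-- moduli once, detect the run boundaries (cut points), materialise the list of maximal
-- increasing runs as (start, stop) pairs, and select the first longest run with max(key).

-- ===== PORT A =====
def get_real (number : Int × Int) : Int := number.1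

def get_imaginary (number : Int × Int) : Int := number.2

-- Python's int(sqrt(x**2 + y**2)). CPython computes this through IEEE doubles:
-- the integer is rounded to nearest-even double, sqrt is correctly rounded, int truncates.
-- The helpers below reproduce that float path EXACTLY in integer arithmetic for every
-- 0 <= n <= 2^63, which covers all inputs in Dom_property1 (|x|,|y| <= 2^31).

-- round n to the nearest double (ties to even); exact for n <= 2^63
def pyFloatRound (n : Nat) : Nat :=
  if n < 2 ^ 53 then n
  else
    let e := Nat.log2 n + 1
    let sh := e - 53
    let q := n / 2 ^ sh
    let rem := n % 2 ^ sh
    let half := 2 ^ (sh - 1)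
    let q' := if rem > half ∨ (rem = half ∧ q % 2 = 1) then q + 1 else q
    q' * 2 ^ sh

-- floor of the correctly rounded double square root of the double nearest n:
-- equals CPython's int(math.sqrt(n)) for 0 <= n <= 2^63
def pyIntSqrtDouble (n : Nat) : Nat :=
  let m := pyFloatRound n
  let r := Nat.sqrt m
  let v := r + 1
  let k := Nat.log2 v
  let t := if v = 2 ^ k then 53 - k else 52 - k
  if m * 2 ^ (2 * t + 2) ≥ v * v * 2 ^ (2 * t + 2) - v * 2 ^ (t + 2) + 1 then v else r

def calculate_modulus (number : Int × Int) : Int :=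
  Int.ofNat (pyIntSqrtDouble (get_real number ^ 2 + get_imaginary number ^ 2).toNat)

-- inner while loop of A: advance j while numbers[j-1] has smaller modulus than numbers[j]
def innerA (numbers : List (Int × Int)) (j : Nat) : Nat :=
  if h : j < numbers.length ∧
      calculate_modulus (numbers.getD (j - 1) (0, 0)) < calculate_modulus (numbers.getD j (0, 0))
  then innerA numbers (j + 1)
  else j
termination_by numbers.length - j
decreasing_by omega

-- the inner loop never moves j backwards (cited by outerA's decreasing_by)
theorem innerA_ge (numbers : List (Int × Int)) (j : Nat) : j ≤ innerA numbers j := by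
  fun_induction innerA numbers j with
  | case1 j h ih => omega
  | case2 j h => omega

-- outer while loop of A; state = (largest, start_location, end_location), i the loop index
def outerA (numbers : List (Int × Int)) (largest : Nat) (sl el : Int) (i : Nat) :
    Nat × Int × Int :=
  if h : i < numbers.length then
    let j := innerA numbers (i + 1)
    let temp := j - i
    if temp > largest then outerA numbers temp (i : Int) ((j : Int) - 1) j
    else outerA numbers largest sl el j
  else (largest, sl, el)
termination_by numbers.length - i
decreasing_by
  · have := innerA_ge numbers (i + 1); omega
  · have := innerA_ge numbers (i + 1); omega

def property1 (numbers : List (Int × Int)) : Int × Int :=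
  let r := outerA numbers 0 0 0 0
  (r.2.1, if r.2.2 - r.2.1 > 0 then r.2.2 else 0)

-- ===== PORT B =====
-- B's inline int(sqrt(x*x + y*y))
def modB (p : Int × Int) : Int := Int.ofNat (pyIntSqrtDouble (p.1 * p.1 + p.2 * p.2).toNat)

-- the comprehension's test: mods[k-1] >= mods[k]
def cutP (mods : List Int) (k : Nat) : Bool := mods.getD (k - 1) 0 ≥ mods.getD k 0

def property1_alt (numbers : List (Int × Int)) : Int × Int :=
  let mods := numbers.map modB
  let n := mods.length
  -- cuts = [0] + [k for k in range(1, n) if mods[k-1] >= mods[k]] + [n]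
  let cuts : List Nat := 0 :: ((List.range' 1 (n - 1)).filter (cutP mods)) ++ [n]
  -- runs = list(zip(cuts, cuts[1:]))
  let runs := cuts.zip cuts.tail
  -- s, stop = max(runs, key=lambda r: r[1] - r[0])
  match PySem.List.max? runs (fun r => (r.2 : Int) - (r.1 : Int)) with
  | some (s, stop) =>
    let e : Int := (stop : Int) - 1
    ((s : Int), if e - (s : Int) > 0 then e else 0)
  | none => (0, 0)  -- unreachable: runs is never empty (totality guard for Python's max)

-- ===== PRECONDITION & SPEC =====
def Spec_property1 (numbers : List (Int × Int)) (out : Int × Int) : Prop := out = property1_alt numbers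
instance (numbers : List (Int × Int)) (out : Int × Int) : Decidable (Spec_property1 numbers out) := by unfold Spec_property1; infer_instance

-- ===== CLAIM (what is proved, stated in full; the proofs are below) =====
def Claim_equal_property1 : Prop := ∀ (numbers : List (Int × Int)), Dom_property1 numbers → Spec_property1 numbers (property1 numbers)

-- ===== LEMMAS AND PROOFS =====

-- the stop condition of A's inner scan, as a Bool predicate on an index
def condB (numbers : List (Int × Int)) (k : Nat) : Bool :=
  decide (k < numbers.length ∧
    calculate_modulus (numbers.getD (k - 1) (0, 0)) < calculate_modulus (numbers.getD k (0, 0)))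

-- one max-update step on A's accumulator, fed with a whole run (start, stop)
def stepM (st : Nat × Int × Int) (p : Nat × Nat) : Nat × Int × Int :=
  if p.2 - p.1 > st.1 then (p.2 - p.1, (p.1 : Int), (p.2 : Int) - 1) else st

theorem modB_eq (p : Int × Int) : modB p = calculate_modulus p := by
  unfold modB calculate_modulus get_real get_imaginary
  have h : p.1 * p.1 + p.2 * p.2 = p.1 ^ 2 + p.2 ^ 2 := by ring
  rw [h]

theorem innerA_mid (numbers : List (Int × Int)) (j k : Nat)
    (hk : j ≤ k) (hk' : k < innerA numbers j) :
    condB numbers k = true := by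
  fun_induction innerA numbers j with
  | case1 j h ih =>
    rcases Nat.eq_or_lt_of_le hk with rfl | hlt
    · simpa [condB] using h
    · exact ih hlt hk'
  | case2 j h => omega

theorem innerA_stop (numbers : List (Int × Int)) (j : Nat) :
    condB numbers (innerA numbers j) = false := by
  fun_induction innerA numbers j with
  | case1 j h ih => exact ih
  | case2 j h => simpa [condB] using h

theorem innerA_le (numbers : List (Int × Int)) (j : Nat) (h : j ≤ numbers.length) :
    innerA numbers j ≤ numbers.length := by
  fun_induction innerA numbers j with
  | case1 j hc ih => exact ih hc.1
  | case2 j hc => exact h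

-- A's outer loop = a fold of the max-update step over the runs cut out by the stop points
theorem outer_fold (numbers : List (Int × Int)) :
    ∀ (c : List Nat) (i : Nat) (largest : Nat) (sl el : Int), i ≤ numbers.length →
      c = (List.range' (i + 1) (numbers.length - i)).filter (fun k => !condB numbers k) →
      outerA numbers largest sl el i = ((i :: c).zip c).foldl stepM (largest, sl, el) := by
  intro c
  induction c with
  | nil =>
    intro i largest sl el hi hceq
    have hin : i = numbers.length := by
      by_contra hne
      have hlt : i < numbers.length := by omega
      have hmem : numbers.length ∈ List.range' (i + 1) (numbers.length - i) := by
        rw [List.mem_range'_1]; omega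
      have : numbers.length ∈
          (List.range' (i + 1) (numbers.length - i)).filter (fun k => !condB numbers k) := by
        rw [List.mem_filter]
        refine ⟨hmem, ?_⟩
        simp [condB]
      rw [← hceq] at this
      simp at this
    rw [outerA, dif_neg (by omega)]
    rfl
  | cons c0 c2 ih =>
    intro i largest sl el hi hceq
    have hlt : i < numbers.length := by
      by_contra hge
      have : numbers.length - i = 0 := by omega
      rw [this] at hceq
      simp at hceq
    set j := innerA numbers (i + 1) with hj
    have hj1 : i + 1 ≤ j := innerA_ge numbers (i + 1)
    have hjn : j ≤ numbers.length := innerA_le numbers (i + 1) hlt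
    -- split the range at j
    have hsplit : List.range' (i + 1) (numbers.length - i) =
        List.range' (i + 1) (j - (i + 1)) ++ List.range' j (numbers.length - j + 1) := by
      have happ := @List.range'_append (i + 1) (j - (i + 1)) (numbers.length - j + 1) 1
      have e1 : i + 1 + 1 * (j - (i + 1)) = j := by omega
      have e2 : j - (i + 1) + (numbers.length - j + 1) = numbers.length - i := by omega
      rw [e1, e2] at happ
      exact happ.symm
    have hnil : (List.range' (i + 1) (j - (i + 1))).filter (fun k => !condB numbers k) = [] := by
      rw [List.filter_eq_nil_iff]
      intro k hk
      rw [List.mem_range'_1] at hk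
      have : condB numbers k = true := innerA_mid numbers (i + 1) k hk.1 (by omega)
      simp [this]
    have hrest : List.range' j (numbers.length - j + 1) =
        j :: List.range' (j + 1) (numbers.length - j) := List.range'_succ ..
    have hstopj : (!condB numbers j) = true := by
      have := innerA_stop numbers (i + 1)
      rw [← hj] at this
      simp [this]
    rw [hsplit, List.filter_append, hnil, List.nil_append, hrest, List.filter_cons,
      if_pos hstopj] at hceq
    have hc0 : c0 = j := (List.cons.injEq .. ▸ hceq).1
    have hc2 : c2 = (List.range' (j + 1) (numbers.length - j)).filter
        (fun k => !condB numbers k) := (List.cons.injEq .. ▸ hceq).2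
    subst hc0
    -- one step of the outer loop
    rw [outerA, dif_pos hlt]
    simp only [← hj]
    have hzip : ((i :: j :: c2).zip (j :: c2)) = (i, j) :: ((j :: c2).zip c2) := rfl
    rw [hzip, List.foldl_cons]
    by_cases hb : j - i > largest
    · rw [if_pos hb]
      have := ih j (j - i) (i : Int) ((j : Int) - 1) hjn hc2
      rw [this]
      congr 1
      simp only [stepM, if_pos hb]
    · rw [if_neg hb]
      have := ih j largest sl el hjn hc2
      rw [this]
      congr 1
      simp only [stepM, if_neg hb]

-- sorted chain ⇒ every consecutive pair in zip xs xs.tail is increasing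
theorem zip_tail_lt {xs : List Nat} (h : xs.Pairwise (· < ·)) :
    ∀ p ∈ xs.zip xs.tail, p.1 < p.2 := by
  induction xs with
  | nil => intro p hp; simp at hp
  | cons a t ih =>
    cases t with
    | nil => intro p hp; simp at hp
    | cons b t2 =>
      intro p hp
      rcases List.mem_cons.mp hp with rfl | hp2
      · exact (List.pairwise_cons.mp h).1 b (List.mem_cons_self)
      · exact ih (List.pairwise_cons.mp h).2 p hp2

-- the accumulator step of Python's max(runs, key=lambda r: r[1] - r[0])
def maxStep (acc : Option (Nat × Nat)) (x : Nat × Nat) : Option (Nat × Nat) :=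
  match acc with
  | none => some x
  | some q => if (q.2 : Int) - (q.1 : Int) < (x.2 : Int) - (x.1 : Int) then some x else some q

theorem max?_eq_foldl (l : List (Nat × Nat)) :
    PySem.List.max? l (fun r => (r.2 : Int) - (r.1 : Int)) = l.foldl maxStep none := by
  unfold PySem.List.max? maxStep
  congr 1
  funext acc x
  cases acc <;> rfl

-- the fold of stepM computes exactly Python's first-maximal run
theorem fold_max (l : List (Nat × Nat)) (m : Nat × Nat)
    (hl : ∀ p ∈ l, p.1 ≤ p.2) (hm : m.1 ≤ m.2) :
    ∃ m', l.foldl maxStep (some m) = some m' ∧ m'.1 ≤ m'.2 ∧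
      l.foldl stepM (m.2 - m.1, (m.1 : Int), (m.2 : Int) - 1) =
        (m'.2 - m'.1, (m'.1 : Int), (m'.2 : Int) - 1) := by
  induction l generalizing m with
  | nil => exact ⟨m, rfl, hm, rfl⟩
  | cons p t ih =>
    have hp : p.1 ≤ p.2 := hl p List.mem_cons_self
    have ht : ∀ q ∈ t, q.1 ≤ q.2 := fun q hq => hl q (List.mem_cons_of_mem p hq)
    simp only [List.foldl_cons]
    by_cases hc : m.2 - m.1 < p.2 - p.1
    · have hci : ((m.2 : Int) - m.1 < (p.2 : Int) - p.1) := by omega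
      rw [show maxStep (some m) p = some p from by simp only [maxStep]; rw [if_pos hci]]
      have hstep : stepM (m.2 - m.1, (m.1 : Int), (m.2 : Int) - 1) p =
          (p.2 - p.1, (p.1 : Int), (p.2 : Int) - 1) := by
        simp only [stepM, if_pos hc]
      rw [hstep]
      exact ih p ht hp
    · have hci : ¬ ((m.2 : Int) - m.1 < (p.2 : Int) - p.1) := by omega
      rw [show maxStep (some m) p = some m from by simp only [maxStep]; rw [if_neg hci]]
      have hstep : stepM (m.2 - m.1, (m.1 : Int), (m.2 : Int) - 1) p =
          (m.2 - m.1, (m.1 : Int), (m.2 : Int) - 1) := by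
        simp only [stepM, if_neg hc]
      rw [hstep]
      exact ih m ht hm

-- ===== VERDICT (by name: the statement is the Claim_ definition above) =====
theorem property1_spec : Claim_equal_property1 := by
  intro numbers _
  unfold Spec_property1
  by_cases hn0 : numbers.length = 0
  · have hnil : numbers = [] := List.length_eq_zero_iff.mp hn0
    subst hnil
    unfold property1
    rw [outer_fold [] [] 0 0 0 0 (by simp) (by simp)]
    decide
  · have hmodsD : ∀ k, k < numbers.length →
        (numbers.map modB).getD k 0 = calculate_modulus (numbers.getD k (0, 0)) := by
      intro k hk
      simp [List.getD, List.getElem?_map, List.getElem?_eq_getElem hk, modB_eq]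
    set C := (List.range' 1 numbers.length).filter (fun k => !condB numbers k) with hC
    have hCne : C ≠ [] := by
      intro hemp
      have hmem : numbers.length ∈ C := by
        rw [hC, List.mem_filter]
        refine ⟨by rw [List.mem_range'_1]; omega, by simp [condB]⟩
      rw [hemp] at hmem
      simp at hmem
    have hpw : (0 :: C).Pairwise (· < ·) := by
      refine List.pairwise_cons.mpr ⟨?_, ?_⟩
      · intro k hk
        rw [hC, List.mem_filter, List.mem_range'_1] at hk
        omega
      · rw [hC]
        exact List.Pairwise.filter _ (List.pairwise_lt_range' (s := 1) (n := numbers.length) 1 Nat.one_pos)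
    -- B's cut list (minus the leading 0) is exactly C
    have hCeqF : ((List.range' 1 (numbers.length - 1)).filter (cutP (numbers.map modB)))
          ++ [numbers.length] = C := by
      rw [hC]
      have hr : List.range' 1 numbers.length =
          List.range' 1 (numbers.length - 1) ++ [numbers.length] := by
        have happ := @List.range'_append 1 (numbers.length - 1) 1 1
        have e1 : 1 + 1 * (numbers.length - 1) = numbers.length := by omega
        have e2 : numbers.length - 1 + 1 = numbers.length := by omega
        rw [e1, e2] at happ
        simpa using happ.symm
      rw [hr, List.filter_append]
      congr 1
      · refine (List.filter_congr ?_).symm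
        intro k hk
        rw [List.mem_range'_1] at hk
        have hkn : k < numbers.length := by omega
        have hk1 : k - 1 < numbers.length := by omega
        rw [cutP, hmodsD k hkn, hmodsD (k - 1) hk1]
        simp only [condB]
        rw [← decide_not]
        refine decide_eq_decide.mpr ?_
        constructor
        · intro h
          by_contra hlt
          exact h ⟨hkn, by omega⟩
        · intro h hcontra
          omega
      · have hcF : condB numbers numbers.length = false := by
          simp only [condB, decide_eq_false_iff_not]
          intro h
          exact absurd h.1 (lt_irrefl _)
        simp [hcF]
    obtain ⟨c0, C2, hCC⟩ := List.exists_cons_of_ne_nil hCne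
    have hc0pos : 0 < c0 :=
      (List.pairwise_cons.mp hpw).1 c0 (by rw [hCC]; exact List.mem_cons_self)
    have hzip : (0 :: C).zip C = (0, c0) :: ((c0 :: C2).zip C2) := by rw [hCC]; rfl
    have hpairs : ∀ p ∈ (c0 :: C2).zip C2, p.1 ≤ p.2 := by
      intro p hp
      have hmem : p ∈ (0 :: C).zip (0 :: C).tail := by
        simp only [List.tail_cons]
        rw [hzip]
        exact List.mem_cons_of_mem _ hp
      exact le_of_lt (zip_tail_lt hpw p hmem)
    obtain ⟨m', hmax', hm'le, hfold'⟩ :=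
      fold_max ((c0 :: C2).zip C2) (0, c0) hpairs (Nat.zero_le c0)
    -- A's side: the outer loop is the stepM fold over the runs
    have hA : outerA numbers 0 0 0 0 = (m'.2 - m'.1, (m'.1 : Int), (m'.2 : Int) - 1) := by
      rw [outer_fold numbers C 0 0 0 0 (by omega) (by rw [hC]; norm_num)]
      rw [hzip, List.foldl_cons]
      have h1 : stepM (0, 0, 0) (0, c0) = (c0 - 0, ((0 : Nat) : Int), (c0 : Int) - 1) := by
        simp only [stepM]
        rw [if_pos (by omega)]
      rw [h1]
      simpa using hfold'
    -- B's side: max over the runs returns m'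
    have hBmax : PySem.List.max? ((0 :: C).zip C) (fun r => (r.2 : Int) - (r.1 : Int))
        = some m' := by
      rw [max?_eq_foldl, hzip, List.foldl_cons]
      simpa [maxStep] using hmax'
    obtain ⟨s, stop⟩ := m'
    have hB : property1_alt numbers =
        ((s : Int), if ((stop : Int) - 1) - (s : Int) > 0 then ((stop : Int) - 1) else 0) := by
      unfold property1_alt
      simp only [List.length_map, List.cons_append]
      simp only [hCeqF]
      simp only [List.tail_cons]
      rw [hBmax]
    rw [hB]
    unfold property1
    rw [hA]
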